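-- pv_equiv track=rewrite | github.com/whitel15/Algorithm | Python/Programmers/Lv_1/부족한 금액 계산하기.py | solution
-- ===== SOURCE A (Python) =====
-- def solution(price, money, count):
--     pay = 0
--
--     for i in range(count):
--         pay += price * (i + 1)
--
--     if money >= pay:
--         return 0
--     else:
--         return pay - money
-- ===== SOURCE B (Python) =====
-- def solution(price, money, count):
--     n = max(count, 0)
--     return max(0, price * n * (n + 1) // 2 - money)
-- ===== Notes on version B (the rewrite author's own statement) =====
-- stated objective: faster
-- what changed: Replaces the O(count) accumulation loop and the explicit if/else with the closed-form shortfall max(0, price*n*(n+1)//2 - money) using the arithmetic-series formula.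
import Mathlib
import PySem

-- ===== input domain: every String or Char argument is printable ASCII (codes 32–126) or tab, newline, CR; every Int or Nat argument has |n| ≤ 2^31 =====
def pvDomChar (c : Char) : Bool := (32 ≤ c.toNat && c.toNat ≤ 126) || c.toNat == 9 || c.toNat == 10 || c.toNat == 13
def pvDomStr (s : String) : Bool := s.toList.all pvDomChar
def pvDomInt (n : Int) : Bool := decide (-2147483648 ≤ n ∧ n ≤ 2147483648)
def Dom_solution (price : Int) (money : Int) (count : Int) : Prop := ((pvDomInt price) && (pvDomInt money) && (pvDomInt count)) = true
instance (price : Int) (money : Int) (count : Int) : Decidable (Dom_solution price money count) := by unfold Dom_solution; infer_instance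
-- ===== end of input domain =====

-- B replaces A's O(count) accumulation loop and branch with the O(1) closed form max(0, price*n*(n+1)//2 - money).

-- ===== PORT A =====
def solution (price : Int) (money : Int) (count : Int) : Int :=
  let pay := (PySem.List.pyRange 0 count 1).foldl (fun pay i => pay + price * (i + 1)) 0
  if money ≥ pay then 0 else pay - money

-- ===== PORT B =====
def solution_alt (price : Int) (money : Int) (count : Int) : Int :=
  let n := max count 0
  max 0 (PySem.Int.floordiv (price * n * (n + 1)) 2 - money)

-- ===== PRECONDITION & SPEC =====
def Spec_solution (price : Int) (money : Int) (count : Int) (out : Int) : Prop := out = solution_alt price money count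
instance (price : Int) (money : Int) (count : Int) (out : Int) : Decidable (Spec_solution price money count out) := by unfold Spec_solution; infer_instance

-- ===== CLAIM (what is proved, stated in full; the proofs are below) =====
def Claim_equal_solution : Prop := ∀ (price : Int) (money : Int) (count : Int), Dom_solution price money count → Spec_solution price money count (solution price money count)

-- ===== LEMMAS AND PROOFS =====

/-- The loop sums price*(i+1) for i in range(c); closed form over max c 0. -/
lemma pay_closed (price c : Int) :
    (PySem.List.pyRange 0 c 1).foldl (fun pay i => pay + price * (i + 1)) 0
      = PySem.Int.floordiv (price * (max c 0) * ((max c 0) + 1)) 2 := by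
  by_cases hc : c ≤ 0
  · rw [PySem.List.pyRange_one_eq_nil (by omega)]
    simp [max_eq_right hc, PySem.Int.floordiv]
  · have key : ∀ n : Nat,
        (PySem.List.pyRange 0 (n : Int) 1).foldl (fun pay i => pay + price * (i + 1)) 0
          = PySem.Int.floordiv (price * n * (n + 1)) 2 := by
      intro n
      induction n with
      | zero => simp [PySem.Int.floordiv]
      | succ m ih =>
        have h1 : ((m + 1 : Nat) : Int) = (m : Int) + 1 := by push_cast; ring
        rw [h1, PySem.List.pyRange_one_succ_right (by positivity), List.foldl_append, ih,
          List.foldl_cons, List.foldl_nil]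
        have he : ∀ a b : Int, a = 2 * b → PySem.Int.floordiv a 2 = b := by
          intro a b hab
          rw [PySem.Int.floordiv_eq_iff_of_pos (by norm_num)]
          omega
        obtain ⟨k, hk⟩ := Int.even_mul_succ_self (m : Int)
        rw [he (price * (m : Int) * ((m : Int) + 1)) (price * k) (by rw [mul_assoc, hk]; ring),
          he (price * ((m : Int) + 1) * ((m : Int) + 1 + 1)) (price * (k + (m : Int) + 1))
            (by have : ((m:Int)+1) * ((m:Int)+1+1) = (m:Int)*((m:Int)+1) + 2*((m:Int)+1) := by ring
                rw [mul_assoc, this, hk]; ring)]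
        ring
    have hcn : c = ((c.toNat : Nat) : Int) := by omega
    rw [max_eq_left (by omega), hcn]
    exact key c.toNat

-- ===== VERDICT (by name: the statement is the Claim_ definition above) =====
theorem solution_spec : Claim_equal_solution := by
  intro price money count _
  unfold Spec_solution solution solution_alt
  dsimp only
  rw [pay_closed]
  omega
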